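-- pv_equiv track=rewrite | github.com/AEGIS-GAME/aegis | scripts/release.py | detect_bump
-- ===== SOURCE A (Python) =====
-- def has_breaking_change(msg: str) -> bool:
--     """Return True if commit has BREAKING CHANGE or '!' before the colon."""
--     if "BREAKING CHANGE" in msg:
--         return True
--     header = msg.split(":", 1)[0]
--     return "!" in header
--
-- def detect_bump(messages: list[str]) -> str | None:
--     """Detect bump version."""
--     bump = None
--     for msg in messages:
--         if has_breaking_change(msg):
--             return "major"
--         if msg.startswith("feat"):
--             bump = "minor"
--         elif msg.startswith("fix") and bump != "minor":
--             bump = "patch"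
--     return bump
-- ===== SOURCE B (Python) =====
-- def has_breaking_change(msg: str) -> bool:
--     """Return True if commit has BREAKING CHANGE or '!' before the colon."""
--     if "BREAKING CHANGE" in msg:
--         return True
--     header = msg.split(":", 1)[0]
--     return "!" in header
--
-- def detect_bump(messages):
--     """Detect bump version: three prioritized short-circuit scans."""
--     if any(has_breaking_change(m) for m in messages):
--         return "major"
--     if any(m.startswith("feat") for m in messages):
--         return "minor"
--     if any(m.startswith("fix") for m in messages):
--         return "patch"
--     return None
-- ===== Notes on version B (the rewrite author's own statement) =====
-- stated objective: simpler
-- what changed: A's single stateful pass with a mutable bump accumulator and early return becomes three prioritized order-independent any() scans (major, then minor, then patch), removing the accumulator entirely.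
import Mathlib
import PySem

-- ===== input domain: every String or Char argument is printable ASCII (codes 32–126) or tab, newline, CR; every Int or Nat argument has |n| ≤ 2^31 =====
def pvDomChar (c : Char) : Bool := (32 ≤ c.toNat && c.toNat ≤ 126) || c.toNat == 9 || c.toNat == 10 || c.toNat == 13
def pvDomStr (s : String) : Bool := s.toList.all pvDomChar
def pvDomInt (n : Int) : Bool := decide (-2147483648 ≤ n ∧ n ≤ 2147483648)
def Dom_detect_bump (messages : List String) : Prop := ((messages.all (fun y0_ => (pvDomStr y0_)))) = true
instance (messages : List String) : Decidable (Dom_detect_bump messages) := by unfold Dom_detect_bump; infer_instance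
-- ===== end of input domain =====

-- B replaces A's single stateful accumulator pass (early return + mutable bump) by three
-- prioritized short-circuit any() scans; simpler decomposition, same O(n) cost.


-- ===== PORT A =====
-- helper shared verbatim by A and B (B reuses it unchanged)
def has_breaking_change (msg : String) : Bool :=
  if PySem.Str.isIn "BREAKING CHANGE" msg then true
  else
    -- header = msg.split(":", 1)[0]; ':' is nonempty so splitMax? is always `some`,
    -- and the split result is always nonempty, so [0] never raises
    let header := ((PySem.Str.splitMax? msg ":" 1).getD [msg]).headD ""
    PySem.Str.isIn "!" header

-- the loop of A: bump is the mutable accumulator, early return on breaking change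
def detect_bump_go (msgs : List String) (bump : Option String) : Option String :=
  match msgs with
  | [] => bump
  | m :: rest =>
    if has_breaking_change m then some "major"
    else if PySem.Str.startswith m "feat" then detect_bump_go rest (some "minor")
    else if PySem.Str.startswith m "fix" && decide (bump ≠ some "minor") then
      detect_bump_go rest (some "patch")
    else detect_bump_go rest bump

def detect_bump (messages : List String) : Option String :=
  detect_bump_go messages none

-- ===== PORT B =====
def detect_bump_alt (messages : List String) : Option String :=
  if messages.any (fun m => has_breaking_change m) then some "major"
  else if messages.any (fun m => PySem.Str.startswith m "feat") then some "minor"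
  else if messages.any (fun m => PySem.Str.startswith m "fix") then some "patch"
  else none

-- ===== PRECONDITION & SPEC =====
def Spec_detect_bump (messages : List String) (out : Option String) : Prop := out = detect_bump_alt messages
instance (messages : List String) (out : Option String) : Decidable (Spec_detect_bump messages out) := by unfold Spec_detect_bump; infer_instance

-- ===== CLAIM (what is proved, stated in full; the proofs are below) =====
def Claim_equal_detect_bump : Prop := ∀ (messages : List String), Dom_detect_bump messages → Spec_detect_bump messages (detect_bump messages)

-- ===== LEMMAS AND PROOFS =====

-- Characterisation of A's loop for an arbitrary accumulator value
theorem detect_bump_go_eq (msgs : List String) (bump : Option String) :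
    detect_bump_go msgs bump =
      if msgs.any (fun m => has_breaking_change m) then some "major"
      else if msgs.any (fun m => PySem.Str.startswith m "feat") then some "minor"
      else if msgs.any (fun m => PySem.Str.startswith m "fix") then
        (if bump = some "minor" then some "minor" else some "patch")
      else bump := by
  induction msgs generalizing bump with
  | nil => simp [detect_bump_go]
  | cons m rest ih =>
    simp only [detect_bump_go, List.any_cons, Bool.or_eq_true]
    by_cases hb : has_breaking_change m = true
    · simp [hb]
    · by_cases hf : PySem.Chars.startswith m.toList ['f','e','a','t'] = true
      · simp [hb, hf, ih]
      · by_cases hx : PySem.Chars.startswith m.toList ['f','i','x'] = true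
        · by_cases hm : bump = some "minor"
          · simp [hb, hf, hx, hm, ih]
          · simp [hb, hf, hx, hm, ih]
        · simp [hb, hf, hx, ih]

-- ===== VERDICT (by name: the statement is the Claim_ definition above) =====
theorem detect_bump_spec : Claim_equal_detect_bump := by
  intro messages _
  unfold Spec_detect_bump detect_bump detect_bump_alt
  rw [detect_bump_go_eq]
  split_ifs <;> simp_all
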